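-- pv_equiv track=rewrite | github.com/dennislx/test_me | me_validate/do_meta.py | _find_common_mappings
-- ===== SOURCE A (Python) =====
-- def _find_common_mappings(list_a, list_b):
--     """Find common mappings between two lists using prefix matching."""
--     from collections import defaultdict
--     import itertools as it
--
--     def prefix_cmp(a, b):
--         return a.startswith(b) or b.startswith(a)
--
--     result, visited = {}, set()
--     prefix_d = defaultdict(list)
--
--     for x, y in it.product(list_a, list_b):
--         if prefix_cmp(x, y):
--             prefix_d[x].append(y)
--
--     # Exact match prioritized
--     for x in list_a:
--         if x in list_b and x not in visited:
--             result[x] = x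
--             visited.add(x)
--
--     # Prefix match for the rest
--     for x in list_a:
--         if x in result:
--             continue
--         for y in prefix_d[x]:
--             if y not in visited:
--                 result[x] = y
--                 visited.add(y)
--                 break
--
--     return result
-- ===== SOURCE B (Python) =====
-- def _find_common_mappings(list_a, list_b):
--     """Find common mappings between two lists using prefix matching.
--
--     Single lazy scan per unmatched key instead of materializing the full
--     A x B prefix table; set-based membership for the exact phase.
--     """
--     b_values = set(list_b)
--     uniq_a = list(dict.fromkeys(list_a))
--     result = {x: x for x in uniq_a if x in b_values}
--     visited = set(result)
--     for x in uniq_a: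
--         if x not in b_values:
--             y = next((y for y in list_b
--                       if y not in visited and (x.startswith(y) or y.startswith(x))),
--                      None)
--             if y is not None:
--                 result[x] = y
--                 visited.add(y)
--     return result
-- ===== Notes on version B (the rewrite author's own statement) =====
-- stated objective: faster
-- what changed: B drops A's eagerly materialized |A|x|B| defaultdict of all prefix-compatible pairs and A's O(|B|) list-membership test per element: it dedups list_a once, uses a set for the exact phase, and finds each remaining element's first unvisited prefix-compatible partner by a single lazy scan of list_b that stops at the first hit and skips already-matched or duplicate keys entirely.
import Mathlib
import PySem

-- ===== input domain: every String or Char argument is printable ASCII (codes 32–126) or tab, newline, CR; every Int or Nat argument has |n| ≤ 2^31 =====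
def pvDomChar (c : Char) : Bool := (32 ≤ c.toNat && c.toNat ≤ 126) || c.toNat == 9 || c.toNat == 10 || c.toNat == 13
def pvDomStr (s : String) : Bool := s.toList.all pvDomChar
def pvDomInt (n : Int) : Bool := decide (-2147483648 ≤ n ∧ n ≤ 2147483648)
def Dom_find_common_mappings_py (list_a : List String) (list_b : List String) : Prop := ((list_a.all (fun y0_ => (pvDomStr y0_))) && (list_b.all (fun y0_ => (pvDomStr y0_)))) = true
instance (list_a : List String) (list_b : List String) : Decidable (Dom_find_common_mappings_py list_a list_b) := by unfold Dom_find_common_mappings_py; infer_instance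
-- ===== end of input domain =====

-- B replaces A's eagerly materialized A×B prefix table and list-membership scans by one
-- ordered-dedup pass, set membership and a lazy first-match scan per unmatched key.

-- ===== PORT A =====
-- prefix_cmp(a, b)
def pvA_pcmp (a b : String) : Bool := PySem.Str.startswith a b || PySem.Str.startswith b a

-- it.product(list_a, list_b)
def pvA_pairs (list_a list_b : List String) : List (String × String) :=
  list_a.flatMap (fun x => list_b.map (fun y => (x, y)))

-- for x, y in it.product(...): if prefix_cmp(x, y): prefix_d[x].append(y)
def pvA_prefixD (list_a list_b : List String) : PySem.Dict String (List String) :=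
  (pvA_pairs list_a list_b).foldl
    (fun d p => if pvA_pcmp p.1 p.2 then d.modify p.1 [] (fun l => l ++ [p.2]) else d)
    PySem.Dict.empty

-- exact-match loop body: if x in list_b and x not in visited: result[x] = x; visited.add(x)
def pvA_exactPass (list_b : List String)
    (st : PySem.Dict String String × PySem.Set String) (x : String) :
    PySem.Dict String String × PySem.Set String :=
  if list_b.contains x && !(PySem.Set.contains st.2 x) then (st.1.insert x x, PySem.Set.add st.2 x)
  else st

-- inner "for y in prefix_d[x]: if y not in visited: ... break" loop
def pvA_firstUnvisited (v : PySem.Set String) : List String → Option String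
  | [] => none
  | y :: ys => if !(PySem.Set.contains v y) then some y else pvA_firstUnvisited v ys

-- prefix-match loop body
def pvA_prefixPass (pd : PySem.Dict String (List String))
    (st : PySem.Dict String String × PySem.Set String) (x : String) :
    PySem.Dict String String × PySem.Set String :=
  if st.1.contains x then st
  else
    match pvA_firstUnvisited st.2 (pd.getD x []) with
    | some y => (st.1.insert x y, PySem.Set.add st.2 y)
    | none => st

def find_common_mappings_py (list_a : List String) (list_b : List String) : List (String × String) :=
  let pd := pvA_prefixD list_a list_b
  let st1 := list_a.foldl (pvA_exactPass list_b) (PySem.Dict.empty, PySem.Set.empty)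
  let st2 := list_a.foldl (pvA_prefixPass pd) st1
  st2.1.items

-- ===== PORT B =====
-- loop body: if x not in b_values: y = next((y for y in list_b if ...), None); ...
def pvB_step (list_b : List String) (bvals : PySem.Set String)
    (st : PySem.Dict String String × PySem.Set String) (x : String) :
    PySem.Dict String String × PySem.Set String :=
  if PySem.Set.contains bvals x then st
  else
    match list_b.find? (fun y => !(PySem.Set.contains st.2 y) &&
        (PySem.Str.startswith x y || PySem.Str.startswith y x)) with
    | some y => (st.1.insert x y, PySem.Set.add st.2 y)
    | none => st

def find_common_mappings_py_alt (list_a : List String) (list_b : List String) :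
    List (String × String) :=
  let bvals := PySem.Set.ofList list_b
  let uniq := PySem.List.dedup list_a
  let exact := uniq.filter (fun x => PySem.Set.contains bvals x)
  let result0 := exact.foldl (fun d x => d.insert x x) PySem.Dict.empty
  let visited0 := PySem.Set.ofList exact
  let st := uniq.foldl (pvB_step list_b bvals) (result0, visited0)
  st.1.items

-- ===== PRECONDITION & SPEC =====
def Spec_find_common_mappings_py (list_a : List String) (list_b : List String) (out : List (String × String)) : Prop := out = find_common_mappings_py_alt list_a list_b
instance (list_a : List String) (list_b : List String) (out : List (String × String)) : Decidable (Spec_find_common_mappings_py list_a list_b out) := by unfold Spec_find_common_mappings_py; infer_instance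

-- ===== CLAIM (what is proved, stated in full; the proofs are below) =====
def Claim_equal_find_common_mappings_py : Prop := ∀ (list_a : List String) (list_b : List String), Dom_find_common_mappings_py list_a list_b → Spec_find_common_mappings_py list_a list_b (find_common_mappings_py list_a list_b)

-- ===== LEMMAS AND PROOFS =====

-- A's inner break loop is find?
theorem pv_first_eq_find (v : PySem.Set String) (l : List String) :
    pvA_firstUnvisited v l = l.find? (fun y => !(PySem.Set.contains v y)) := by
  induction l with
  | nil => rfl
  | cons y ys ih =>
    cases h : (!(PySem.Set.contains v y)) <;>
      simp only [pvA_firstUnvisited, List.find?_cons, h, ih, if_true, if_false, Bool.false_eq_true]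

-- a guarded fold is a fold over the filtered list
theorem pv_foldl_if_filter {α β : Type} (f : β → α → β) (c : α → Bool) :
    ∀ (l : List α) (b : β),
      l.foldl (fun b a => if c a then f b a else b) b = (l.filter c).foldl f b := by
  intro l
  induction l with
  | nil => intro b; rfl
  | cons a t ih =>
    intro b
    by_cases h : c a <;> simp [h, ih]

-- the prefix_d bucket of x, as blocks over list_a
theorem pv_blocks (lb : List String) (x : String) :
    ∀ (la : List String),
      (((pvA_pairs la lb).filter (fun p => pvA_pcmp p.1 p.2)).filter
          (fun p => p.1 == x)).map (fun p => p.2) =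
        la.flatMap (fun a => if a = x then lb.filter (fun y => pvA_pcmp x y) else []) := by
  intro la
  induction la with
  | nil => rfl
  | cons a t ih =>
    have hpairs : pvA_pairs (a :: t) lb = lb.map (fun y => (a, y)) ++ pvA_pairs t lb := by
      simp [pvA_pairs]
    rw [hpairs]
    simp only [List.filter_append, List.map_append, ih, List.flatMap_cons]
    congr 1
    by_cases ha : a = x
    · subst ha
      simp [List.filter_filter, List.filter_map, List.map_map, Function.comp_def]
    · simp [List.filter_filter, List.filter_map, Function.comp_def, ha]

theorem pv_find_blocks_none {x : String} (F : List String) (P : String → Bool)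
    (h : F.find? P = none) :
    ∀ la : List String, ((la.flatMap (fun a => if a = x then F else [])).find? P) = none := by
  intro la
  induction la with
  | nil => rfl
  | cons a t ih =>
    by_cases ha : a = x <;> simp [List.flatMap_cons, List.find?_append, ha, h, ih]

theorem pv_find_blocks {x : String} (F : List String) (P : String → Bool) :
    ∀ la : List String, x ∈ la →
      ((la.flatMap (fun a => if a = x then F else [])).find? P) = F.find? P := by
  intro la
  induction la with
  | nil => intro h; cases h
  | cons a t ih =>
    intro hmem
    by_cases ha : a = x
    · subst ha
      cases hF : F.find? P with
      | some y => simp [List.flatMap_cons, List.find?_append, hF]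
      | none => simp [List.flatMap_cons, List.find?_append, hF, pv_find_blocks_none F P hF]
    · have hx : x ∈ t := by
        rcases List.mem_cons.mp hmem with h | h
        · exact absurd h.symm ha
        · exact h
      simp [List.flatMap_cons, ha, ih hx]

-- A's bucket scan equals B's direct scan of list_b
theorem pvA_inner_eq (la lb : List String) (x : String) (hx : x ∈ la)
    (v : PySem.Set String) :
    pvA_firstUnvisited v ((pvA_prefixD la lb).getD x []) =
      lb.find? (fun y => !(PySem.Set.contains v y) && pvA_pcmp x y) := by
  rw [pv_first_eq_find]
  have h1 : (pvA_prefixD la lb).getD x [] =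
      la.flatMap (fun a => if a = x then lb.filter (fun y => pvA_pcmp x y) else []) := by
    unfold pvA_prefixD
    rw [pv_foldl_if_filter
      (fun (d : PySem.Dict String (List String)) (p : String × String) =>
        d.modify p.1 [] (fun l => l ++ [p.2]))
      (fun p => pvA_pcmp p.1 p.2)]
    rw [PySem.Dict.getD_foldl_modify_append]
    rw [← pv_blocks lb x la]
    simp [PySem.Dict.getD_empty]
  rw [h1, pv_find_blocks _ _ la hx, List.find?_filter]
  congr 1
  funext y
  cases hc : pvA_pcmp x y <;> cases hv : PySem.Set.contains v y <;> rfl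

theorem pv_ofList_contains (lb : List String) (x : String) :
    PySem.Set.contains (PySem.Set.ofList lb) x = lb.contains x := by
  by_cases h : x ∈ lb <;>
    simp [PySem.Set.contains, PySem.Set.mem_ofList, h]

-- first-occurrence scan with a predicate and a seen-list
def pvScan (p : String → Bool) : List String → List String → List String
  | [], _ => []
  | x :: xs, E => if p x && !E.contains x then x :: pvScan p xs (E ++ [x]) else pvScan p xs E

theorem pvScan_char (p : String → Bool) :
    ∀ (la E : List String),
      pvScan p la E =
        ((PySem.Set.ofList la).filter p).filter (fun x => !E.contains x) := by
  intro la
  induction la with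
  | nil => intro E; rfl
  | cons a t ih =>
    intro E
    rw [PySem.Set.ofList_cons]
    simp only [PySem.Set.discard]
    by_cases hp : p a
    · by_cases hE : a ∈ E
      · have hc : (p a && !E.contains a) = false := by
          simp [hp, List.contains_eq_mem, hE]
        rw [pvScan, if_neg (by rw [hc]; exact Bool.false_ne_true), ih]
        rw [List.filter_cons_of_pos hp, List.filter_cons_of_neg (by simp [List.contains_eq_mem, hE])]
        simp only [List.filter_filter]
        refine List.filter_congr ?_
        intro y _
        by_cases hya : y = a
        · simp [hya, List.contains_eq_mem, hE, hp]
        · simp [show (y == a) = false from beq_eq_false_iff_ne.mpr hya, List.contains_eq_mem]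
      · have hc : (p a && !E.contains a) = true := by
          simp [hp, List.contains_eq_mem, hE]
        rw [pvScan, if_pos hc, ih]
        rw [List.filter_cons_of_pos hp, List.filter_cons_of_pos (by simp [List.contains_eq_mem, hE])]
        congr 1
        simp only [List.filter_filter]
        refine List.filter_congr ?_
        intro y _
        by_cases hya : y = a
        · simp [hya, List.contains_eq_mem, List.mem_append]
        · simp [show (y == a) = false from beq_eq_false_iff_ne.mpr hya,
            List.contains_eq_mem, List.mem_append, hya]
    · have hc : (p a && !E.contains a) = false := by simp [hp]
      rw [pvScan, if_neg (by rw [hc]; exact Bool.false_ne_true), ih]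
      rw [List.filter_cons_of_neg (by simp [hp])]
      simp only [List.filter_filter]
      refine List.filter_congr ?_
      intro y _
      by_cases hya : y = a
      · simp [hya, hp]
      · simp [show (y == a) = false from beq_eq_false_iff_ne.mpr hya]

-- A's exact pass, characterized
theorem pv_pass1 (lb : List String) :
    ∀ (la E : List String), E.Nodup →
      la.foldl (pvA_exactPass lb) (PySem.Dict.mk (E.map (fun x => (x, x))), E) =
        (PySem.Dict.mk ((E ++ pvScan (fun z => lb.contains z) la E).map (fun x => (x, x))),
          E ++ pvScan (fun z => lb.contains z) la E) := by
  intro la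
  induction la with
  | nil => intro E _; simp [pvScan]
  | cons x t ih =>
    intro E hE
    rw [List.foldl_cons]
    by_cases hc : (lb.contains x && !E.contains x) = true
    · have hxE : x ∉ E := by
        intro hmem
        simp [List.contains_eq_mem, hmem] at hc
      have hstep : pvA_exactPass lb (PySem.Dict.mk (E.map (fun x => (x, x))), E) x =
          (PySem.Dict.mk ((E ++ [x]).map (fun x => (x, x))), E ++ [x]) := by
        unfold pvA_exactPass
        rw [if_pos (by simpa [PySem.Set.contains] using hc)]
        refine Prod.ext ?_ ?_
        · apply PySem.Dict.ext
          rw [PySem.Dict.items_insert_of_not_contains]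
          · simp
          · simp only [PySem.Dict.contains_mk]
            simp only [List.any_map, List.any_eq_false, Function.comp_def, beq_iff_eq]
            exact fun a ha he => hxE (he ▸ ha)
        · simpa using PySem.Set.add_of_not_mem hxE
      rw [hstep, ih (E ++ [x])
        (by
          refine hE.append (List.nodup_singleton x) ?_
          intro a ha hx1
          exact hxE ((List.mem_singleton.mp hx1) ▸ ha))]
      rw [pvScan, if_pos hc]
      simp
    · have hstep : pvA_exactPass lb (PySem.Dict.mk (E.map (fun x => (x, x))), E) x =
          (PySem.Dict.mk (E.map (fun x => (x, x))), E) := by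
        unfold pvA_exactPass
        rw [if_neg (by simpa [PySem.Set.contains] using hc)]
      rw [hstep, ih E hE, pvScan, if_neg hc]

-- A's prefix pass over list_a equals B's pass over the not-yet-seen dedup
theorem pv_pass2 (la lb : List String) :
    ∀ (rest S : List String) (d : PySem.Dict String String) (v : PySem.Set String),
      (∀ x ∈ rest, x ∈ la) →
      (∀ x ∈ S, d.contains x = true ∨ (∀ y ∈ lb, pvA_pcmp x y = true → y ∈ v)) →
      (∀ x ∈ rest, x ∉ S → d.contains x = lb.contains x) →
      rest.foldl (pvA_prefixPass (pvA_prefixD la lb)) (d, v) =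
        (pvScan (fun _ => true) rest S).foldl (pvB_step lb (PySem.Set.ofList lb)) (d, v) := by
  intro rest
  induction rest with
  | nil => intro S d v _ _ _; simp [pvScan]
  | cons x xs ih =>
    intro S d v hrest hS hd
    have hxla : x ∈ la := hrest x (List.mem_cons_self)
    rw [List.foldl_cons]
    by_cases hxS : x ∈ S
    · -- already handled occurrence: A's step is a no-op, B's dedup drops it
      rw [pvScan, if_neg (by simp [List.contains_eq_mem, hxS])]
      have hstep : pvA_prefixPass (pvA_prefixD la lb) (d, v) x = (d, v) := by
        unfold pvA_prefixPass
        cases hdc : d.contains x with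
        | true => rw [if_pos rfl]
        | false =>
          rw [if_neg (by simp)]
          have hnone : ∀ y ∈ lb, pvA_pcmp x y = true → y ∈ v := by
            rcases hS x hxS with h | h
            · rw [hdc] at h; cases h
            · exact h
          have hfind : lb.find? (fun y => !(PySem.Set.contains v y) && pvA_pcmp x y) = none := by
            rw [List.find?_eq_none]
            intro y hy
            cases hp : pvA_pcmp x y
            · simp
            · have hyv : y ∈ v := hnone y hy hp
              simpa using hyv
          simp only [pvA_inner_eq la lb x hxla v, hfind]
      rw [hstep]
      exact ih S d v (fun z hz => hrest z (List.mem_cons_of_mem x hz)) hS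
        (fun z hz hzS => hd z (List.mem_cons_of_mem x hz) hzS)
    · -- first occurrence: both sides take the same step
      rw [pvScan, if_pos (by simp [List.contains_eq_mem, hxS]), List.foldl_cons]
      have hdx : d.contains x = lb.contains x := hd x (List.mem_cons_self) hxS
      have hbx : PySem.Set.contains (PySem.Set.ofList lb) x = d.contains x := by
        rw [pv_ofList_contains, hdx]
      have hS' : ∀ (d' : PySem.Dict String String) (v' : PySem.Set String),
          (∀ z ∈ S, d'.contains z = true ∨ (∀ y ∈ lb, pvA_pcmp z y = true → y ∈ v')) →
          d'.contains x = true ∨ (∀ y ∈ lb, pvA_pcmp x y = true → y ∈ v') →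
          (∀ z ∈ S ++ [x], d'.contains z = true ∨ (∀ y ∈ lb, pvA_pcmp z y = true → y ∈ v')) := by
        intro d' v' hold hx z hz
        rcases List.mem_append.mp hz with h | h
        · exact hold z h
        · rw [List.mem_singleton.mp h]; exact hx
      cases hdc : d.contains x with
      | true =>
        have hstepA : pvA_prefixPass (pvA_prefixD la lb) (d, v) x = (d, v) := by
          unfold pvA_prefixPass; rw [if_pos hdc]
        have hstepB : pvB_step lb (PySem.Set.ofList lb) (d, v) x = (d, v) := by
          unfold pvB_step; rw [if_pos (by rw [hbx, hdc])]
        rw [hstepA, hstepB]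
        refine ih (S ++ [x]) d v (fun z hz => hrest z (List.mem_cons_of_mem x hz))
          (hS' d v hS (Or.inl hdc)) ?_
        intro z hz hzS
        exact hd z (List.mem_cons_of_mem x hz)
          (fun h => hzS (List.mem_append.mpr (Or.inl h)))
      | false =>
        have hAfind : pvA_firstUnvisited v ((pvA_prefixD la lb).getD x []) =
            lb.find? (fun y => !(PySem.Set.contains v y) &&
              (PySem.Str.startswith x y || PySem.Str.startswith y x)) :=
          pvA_inner_eq la lb x hxla v
        cases hf : lb.find? (fun y => !(PySem.Set.contains v y) &&
            (PySem.Str.startswith x y || PySem.Str.startswith y x)) with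
        | none =>
          have hstepA : pvA_prefixPass (pvA_prefixD la lb) (d, v) x = (d, v) := by
            unfold pvA_prefixPass
            rw [if_neg (by simp [hdc])]
            simp only [hAfind, hf]
          have hstepB : pvB_step lb (PySem.Set.ofList lb) (d, v) x = (d, v) := by
            unfold pvB_step
            rw [if_neg (by rw [hbx, hdc]; exact Bool.false_ne_true)]
            simp only [hf]
          rw [hstepA, hstepB]
          have hxnone : ∀ y ∈ lb, pvA_pcmp x y = true → y ∈ v := by
            intro y hy hp
            have := List.find?_eq_none.mp hf y hy
            cases hv : PySem.Set.contains v y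
            · exfalso
              apply this
              rw [hv]
              simpa [pvA_pcmp] using hp
            · exact (PySem.Set.contains_iff v y).mp hv
          refine ih (S ++ [x]) d v (fun z hz => hrest z (List.mem_cons_of_mem x hz))
            (hS' d v hS (Or.inr hxnone)) ?_
          intro z hz hzS
          exact hd z (List.mem_cons_of_mem x hz)
            (fun h => hzS (List.mem_append.mpr (Or.inl h)))
        | some y =>
          have hstepA : pvA_prefixPass (pvA_prefixD la lb) (d, v) x =
              (d.insert x y, PySem.Set.add v y) := by
            unfold pvA_prefixPass
            rw [if_neg (by simp [hdc])]
            simp only [hAfind, hf]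
          have hstepB : pvB_step lb (PySem.Set.ofList lb) (d, v) x =
              (d.insert x y, PySem.Set.add v y) := by
            unfold pvB_step
            rw [if_neg (by rw [hbx, hdc]; exact Bool.false_ne_true)]
            simp only [hf]
          rw [hstepA, hstepB]
          refine ih (S ++ [x]) (d.insert x y) (PySem.Set.add v y)
            (fun z hz => hrest z (List.mem_cons_of_mem x hz)) ?_ ?_
          · refine hS' (d.insert x y) (PySem.Set.add v y) ?_ (Or.inl (PySem.Dict.contains_insert_self d x y))
            intro z hz
            rcases hS z hz with h | h
            · left; rw [PySem.Dict.contains_insert, h]; simp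
            · right; intro y' hy' hp
              exact (PySem.Set.mem_add v y y').mpr (Or.inl (h y' hy' hp))
          · intro z hz hzS
            have hzx : z ≠ x := fun h => hzS (List.mem_append.mpr (Or.inr (by simp [h])))
            have hzS0 : z ∉ S := fun h => hzS (List.mem_append.mpr (Or.inl h))
            rw [PySem.Dict.contains_insert, beq_eq_false_iff_ne.mpr hzx]
            simpa using hd z (List.mem_cons_of_mem x hz) hzS0

-- ===== VERDICT (by name: the statement is the Claim_ definition above) =====
theorem find_common_mappings_py_spec : Claim_equal_find_common_mappings_py := by
  intro la lb _
  simp only [Spec_find_common_mappings_py, find_common_mappings_py, find_common_mappings_py_alt]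
  have hE : pvScan (fun z => lb.contains z) la [] =
      (PySem.Set.ofList la).filter (fun z => lb.contains z) := by
    rw [pvScan_char]
    simp
  set E := pvScan (fun z => lb.contains z) la [] with hEdef
  have hnodE : E.Nodup := by rw [hE]; exact (PySem.Set.nodup_ofList la).filter _
  have hpass1 : la.foldl (pvA_exactPass lb) (PySem.Dict.empty, PySem.Set.empty) =
      (PySem.Dict.mk (E.map (fun x => (x, x))), E) := by
    have h := pv_pass1 lb la [] List.nodup_nil
    rw [List.nil_append, List.map_nil] at h
    exact h
  have hexact : (PySem.List.dedup la).filter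
      (fun x => PySem.Set.contains (PySem.Set.ofList lb) x) = E := by
    have hdd : PySem.List.dedup la = PySem.Set.ofList la := rfl
    rw [hdd, hE]
    exact List.filter_congr (fun x _ => pv_ofList_contains lb x)
  have hres0 : ((PySem.List.dedup la).filter
        (fun x => PySem.Set.contains (PySem.Set.ofList lb) x)).foldl
        (fun d x => d.insert x x) PySem.Dict.empty =
      PySem.Dict.mk (E.map (fun x => (x, x))) := by
    rw [hexact]
    apply PySem.Dict.ext
    have h := PySem.Dict.items_foldl_insert_fresh E (fun a => a) (fun a => a) PySem.Dict.empty
      (fun a _ => by simp [PySem.Dict.contains_empty]) (by simpa using hnodE)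
    simpa using h
  have hvis : PySem.Set.ofList ((PySem.List.dedup la).filter
      (fun x => PySem.Set.contains (PySem.Set.ofList lb) x)) = E := by
    rw [hexact]
    exact PySem.Set.ofList_eq_self_of_nodup E hnodE
  have hscan : pvScan (fun _ => true) la [] = PySem.List.dedup la := by
    rw [pvScan_char]
    simp [PySem.List.dedup]
  have hcont : ∀ x ∈ la, x ∉ ([] : List String) →
      (PySem.Dict.mk (E.map (fun x => (x, x)))).contains x = lb.contains x := by
    intro x hx _
    rw [PySem.Dict.contains_mk]
    cases hlb : lb.contains x with
    | true =>
      have hxE : x ∈ E := by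
        rw [hE]
        exact List.mem_filter.mpr ⟨(PySem.Set.mem_ofList la x).mpr hx, hlb⟩
      simp only [List.any_eq_true]
      exact ⟨(x, x), List.mem_map_of_mem hxE, by simp⟩
    | false =>
      rw [List.any_eq_false]
      rintro ⟨z, w⟩ hmem
      rcases List.mem_map.mp hmem with ⟨u, huE, hu⟩
      injection hu with h1 h2
      subst h1
      have huLb : lb.contains u = true := (List.mem_filter.mp (hE ▸ huE)).2
      intro hux
      have hx' : u = x := by simpa using hux
      rw [hx'] at huLb
      rw [huLb] at hlb
      cases hlb
  have hpass2 := pv_pass2 la lb la [] (PySem.Dict.mk (E.map (fun x => (x, x)))) E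
    (fun z hz => hz) (by simp) hcont
  rw [hpass1, hpass2, hscan, hres0, hvis]
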